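-- pv_equiv track=rewrite | github.com/topranks/random_wmf | netbox_scripts/get_frack_ips/gen_zones/gen_frack_dns.py | get_record_data
-- ===== SOURCE A (Python) =====
-- zone_data = {
--     '10.in-addr.arpa': { 'records': {}, 'type': 'PTR' },
--     'frack.eqiad.wmnet': { 'records': {}, 'type': 'A' },
--     'mgmt.frack.eqiad.wmnet': { 'records': {}, 'type': 'A' },
--     'frack.codfw.wmnet': { 'records': {}, 'type': 'A' },
--     'mgmt.frack.codfw.wmnet': { 'records': {}, 'type': 'A' }
-- }
--
-- def get_record_data(dns_name):
--     """ Finds longest matching zone that dns_name could be part of and returns dns_name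
--         split into the parent_zone part and the RR record label part accordingly """
--     zone_labels = 0
--     parent_zone = ''
--     # Loop over all the zone names we statically defined at the top
--     for zone_name in zone_data.keys():
--         if zone_name in dns_name:
--             # The dns_name could fit into this one, compare to see if it's longest/most specific match
--             num_labels = len(zone_name.split("."))
--             if num_labels > zone_labels:
--                 zone_labels = num_labels
--                 parent_zone = zone_name
--
--     # Calculate local RR label within the zone by stripping off the last N labels
--     total_labels = len(dns_name.split('.'))
--     rr_label = ".".join(dns_name.split('.')[0:(total_labels-zone_labels)])
--     return parent_zone, rr_label
-- ===== SOURCE B (Python) =====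
-- zone_data = {
--     '10.in-addr.arpa': { 'records': {}, 'type': 'PTR' },
--     'frack.eqiad.wmnet': { 'records': {}, 'type': 'A' },
--     'mgmt.frack.eqiad.wmnet': { 'records': {}, 'type': 'A' },
--     'frack.codfw.wmnet': { 'records': {}, 'type': 'A' },
--     'mgmt.frack.codfw.wmnet': { 'records': {}, 'type': 'A' }
-- }
--
-- def get_record_data(dns_name):
--     """ Longest-match by scanning zones pre-sorted by descending label count:
--         the first substring match is the most specific, so we stop there. """
--     zone_labels = 0
--     parent_zone = ''
--     for zone_name in sorted(zone_data, key=lambda z: len(z.split(".")), reverse=True):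
--         if zone_name in dns_name:
--             zone_labels = len(zone_name.split("."))
--             parent_zone = zone_name
--             break
--     labels = dns_name.split('.')
--     rr_label = ".".join(labels[0:(len(labels) - zone_labels)])
--     return parent_zone, rr_label
-- ===== Notes on version B (the rewrite author's own statement) =====
-- stated objective: alternative
-- what changed: Instead of scanning every zone and maintaining a running max of label counts, B sorts the zone names once by descending label count (stable) and returns on the FIRST substring match, which is necessarily the most specific; the max-tracking loop disappears.
import Mathlib
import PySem

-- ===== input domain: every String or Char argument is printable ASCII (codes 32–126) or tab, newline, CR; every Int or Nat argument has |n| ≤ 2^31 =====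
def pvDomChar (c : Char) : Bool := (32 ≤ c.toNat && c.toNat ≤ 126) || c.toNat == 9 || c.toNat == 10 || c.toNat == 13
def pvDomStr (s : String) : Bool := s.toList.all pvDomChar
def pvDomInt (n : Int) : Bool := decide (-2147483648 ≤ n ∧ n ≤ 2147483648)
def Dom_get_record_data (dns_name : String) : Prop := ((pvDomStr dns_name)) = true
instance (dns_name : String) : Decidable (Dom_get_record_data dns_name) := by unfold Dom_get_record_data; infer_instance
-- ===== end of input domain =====

-- B scans the zone names pre-sorted by descending label count and stops at the first
-- substring match (necessarily the most specific), instead of A's running-max scan.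


-- ===== PORT A =====
-- zone_data.keys() in insertion order
def zoneNames : List String :=
  ["10.in-addr.arpa", "frack.eqiad.wmnet", "mgmt.frack.eqiad.wmnet",
   "frack.codfw.wmnet", "mgmt.frack.codfw.wmnet"]

def get_record_data (dns_name : String) : String × String :=
  -- for zone_name in zone_data.keys(): running max of label counts
  let st := zoneNames.foldl (fun (st : Int × String) zone_name =>
      if PySem.Str.isIn zone_name dns_name then
        let num_labels : Int := ((PySem.Str.split? zone_name ".").getD []).length
        if num_labels > st.1 then (num_labels, zone_name) else st
      else st) (0, "")
  let zone_labels := st.1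
  let parent_zone := st.2
  let total_labels : Int := ((PySem.Str.split? dns_name ".").getD []).length
  let rr_label := PySem.Str.join "."
      (PySem.List.slice ((PySem.Str.split? dns_name ".").getD []) (some 0) (some (total_labels - zone_labels)))
  (parent_zone, rr_label)

-- ===== PORT B =====
-- the for-loop with break: first match in the sorted list
def firstZoneMatch (dns_name : String) : List String → Int × String
  | [] => (0, "")
  | zone_name :: rest =>
      if PySem.Str.isIn zone_name dns_name then
        ((((PySem.Str.split? zone_name ".").getD []).length : Int), zone_name)
      else firstZoneMatch dns_name rest

def get_record_data_alt (dns_name : String) : String × String :=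
  let sortedZones := PySem.List.sorted zoneNames (fun z => ((PySem.Str.split? z ".").getD []).length) true
  let st := firstZoneMatch dns_name sortedZones
  let zone_labels := st.1
  let parent_zone := st.2
  let labels := (PySem.Str.split? dns_name ".").getD []
  let rr_label := PySem.Str.join "."
      (PySem.List.slice labels (some 0) (some ((labels.length : Int) - zone_labels)))
  (parent_zone, rr_label)

-- ===== PRECONDITION & SPEC =====
def Spec_get_record_data (dns_name : String) (out : String × String) : Prop := out = get_record_data_alt dns_name
instance (dns_name : String) (out : String × String) : Decidable (Spec_get_record_data dns_name out) := by unfold Spec_get_record_data; infer_instance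

-- ===== CLAIM (what is proved, stated in full; the proofs are below) =====
def Claim_equal_get_record_data : Prop := ∀ (dns_name : String), Dom_get_record_data dns_name → Spec_get_record_data dns_name (get_record_data dns_name)

-- ===== LEMMAS AND PROOFS =====
theorem sortedZones_eval :
    PySem.List.sorted zoneNames (fun z => ((PySem.Str.split? z ".").getD []).length) true
      = ["mgmt.frack.eqiad.wmnet", "mgmt.frack.codfw.wmnet", "10.in-addr.arpa",
         "frack.eqiad.wmnet", "frack.codfw.wmnet"] := by decide

theorem len_z1 : (((PySem.Str.split? "10.in-addr.arpa" ".").getD []).length : Int) = 3 := by decide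
theorem len_z2 : (((PySem.Str.split? "frack.eqiad.wmnet" ".").getD []).length : Int) = 3 := by decide
theorem len_z3 : (((PySem.Str.split? "mgmt.frack.eqiad.wmnet" ".").getD []).length : Int) = 4 := by decide
theorem len_z4 : (((PySem.Str.split? "frack.codfw.wmnet" ".").getD []).length : Int) = 3 := by decide
theorem len_z5 : (((PySem.Str.split? "mgmt.frack.codfw.wmnet" ".").getD []).length : Int) = 4 := by decide

theorem get_record_data_spec : Claim_equal_get_record_data := by
  intro dns_name _
  unfold Spec_get_record_data get_record_data get_record_data_alt
  rw [sortedZones_eval]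
  cases h1 : PySem.Str.isIn "10.in-addr.arpa" dns_name <;>
  cases h2 : PySem.Str.isIn "frack.eqiad.wmnet" dns_name <;>
  cases h3 : PySem.Str.isIn "mgmt.frack.eqiad.wmnet" dns_name <;>
  cases h4 : PySem.Str.isIn "frack.codfw.wmnet" dns_name <;>
  cases h5 : PySem.Str.isIn "mgmt.frack.codfw.wmnet" dns_name <;>
  simp only [zoneNames, List.foldl, firstZoneMatch, h1, h2, h3, h4, h5,
    len_z1, len_z2, len_z3, len_z4, len_z5, if_true, if_false,
    Bool.false_eq_true] <;> norm_num
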